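-- pv_equiv track=rewrite | github.com/andrazsitar/praktikal | praktikal/numunc.py | cartesianProdFlat
-- ===== SOURCE A (Python) =====
-- def cartesianProdFlat(listVars):
--         listReturn = []
--         arr1 = listVars[0]
--         if len(listVars) > 1:
--                 arr2 = cartesianProdFlat(listVars[1:])
--                 for el1 in arr1:
--                         for el2 in arr2:
--                                 listReturn.append((el1,) + el2)
--                 return listReturn
--         else:
--                 for el in arr1:
--                         listReturn.append((el,))
--                 return listReturn
-- ===== SOURCE B (Python) =====
-- def cartesianProdFlat(listVars):
--     result = [()]
--     for lst in listVars:
--         result = [r + (x,) for r in result for x in lst]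
--     return result
-- ===== Notes on version B (the rewrite author's own statement) =====
-- stated objective: idiomatic
-- what changed: Replaced the slice-based recursion (which rebuilds listVars[1:] at every level and prepends) with a single left-to-right loop over listVars that extends an accumulator of partial tuples by appending each element.
-- outside the precondition, e.g. on cartesianProdFlat([]): A raises IndexError, B returns [()]
-- crash fix: On empty listVars A raises IndexError (listVars[0]); B returns [()], the unit of the cartesian product. — e.g. on cartesianProdFlat([]): A raises IndexError, B returns [[]]
import Mathlib
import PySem

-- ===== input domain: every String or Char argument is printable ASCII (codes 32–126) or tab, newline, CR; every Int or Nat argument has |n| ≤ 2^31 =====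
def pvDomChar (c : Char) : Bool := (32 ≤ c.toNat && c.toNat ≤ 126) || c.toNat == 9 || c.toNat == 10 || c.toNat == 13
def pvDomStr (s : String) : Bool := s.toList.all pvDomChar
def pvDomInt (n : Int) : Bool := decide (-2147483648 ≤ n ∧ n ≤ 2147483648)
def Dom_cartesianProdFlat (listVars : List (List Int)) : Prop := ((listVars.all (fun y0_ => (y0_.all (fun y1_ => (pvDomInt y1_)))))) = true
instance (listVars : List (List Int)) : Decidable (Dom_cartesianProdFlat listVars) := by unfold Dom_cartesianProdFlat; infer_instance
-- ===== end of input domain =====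

-- B replaces A's slice-based recursion with a left-to-right foldl over listVars extending an
-- accumulator of partial tuples (more idiomatic); return values agree on non-empty listVars,
-- where A instead raises IndexError on [] and B returns [()].


-- ===== PORT A =====
-- Literal port of A's recursion: listVars[0] raises IndexError on [] (excluded by Pre_);
-- len > 1 branch recurses on the tail, then appends (el1,)+el2 in a nested loop.
def cartesianProdFlat : List (List Int) → List (List Int)
  | [] => []  -- Python: IndexError on listVars[0]; outside Pre_
  | [arr1] => arr1.foldl (fun acc el => acc ++ [[el]]) []
  | arr1 :: r1 :: rest =>
      let arr2 := cartesianProdFlat (r1 :: rest)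
      arr1.foldl (fun acc el1 => arr2.foldl (fun acc2 el2 => acc2 ++ [el1 :: el2]) acc) []

-- ===== PORT B =====
-- Literal port of B: result = [()]; for lst in listVars: result = [r + (x,) for r in result for x in lst]
def cartesianProdFlat_alt (listVars : List (List Int)) : List (List Int) :=
  listVars.foldl (fun result lst => result.flatMap (fun r => lst.map (fun x => r ++ [x]))) [[]]

-- ===== PRECONDITION & SPEC =====
-- Pre_ excludes only the empty outer list, on which A raises IndexError (listVars[0]).
def Pre_cartesianProdFlat (listVars : List (List Int)) : Prop := listVars ≠ []
instance (listVars : List (List Int)) : Decidable (Pre_cartesianProdFlat listVars) := by unfold Pre_cartesianProdFlat; infer_instance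
def pvWitness_cartesianProdFlat : List (List Int) := [[1, 2], [3]]

-- On empty listVars A raises IndexError (listVars[0]); B returns [()], the unit of the cartesian product.
def Raises_cartesianProdFlat (listVars : List (List Int)) : Prop := listVars = []
instance (listVars : List (List Int)) : Decidable (Raises_cartesianProdFlat listVars) := by unfold Raises_cartesianProdFlat; infer_instance
def pvRaiseWitness_cartesianProdFlat : List (List Int) := []
def pvRaiseWitnessOut_cartesianProdFlat : List (List Int) := [[]]

def Spec_cartesianProdFlat (listVars : List (List Int)) (out : List (List Int)) : Prop := out = cartesianProdFlat_alt listVars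
instance (listVars : List (List Int)) (out : List (List Int)) : Decidable (Spec_cartesianProdFlat listVars out) := by unfold Spec_cartesianProdFlat; infer_instance

-- ===== CLAIM (what is proved, stated in full; the proofs are below) =====
def Claim_equal_cartesianProdFlat : Prop := ∀ (listVars : List (List Int)), Dom_cartesianProdFlat listVars → Pre_cartesianProdFlat listVars → Spec_cartesianProdFlat listVars (cartesianProdFlat listVars)
def Claim_raises_cartesianProdFlat : Prop := (∀ (listVars : List (List Int)), Dom_cartesianProdFlat listVars → Raises_cartesianProdFlat listVars → ¬ Pre_cartesianProdFlat listVars) ∧ (Dom_cartesianProdFlat (pvRaiseWitness_cartesianProdFlat) ∧ Raises_cartesianProdFlat (pvRaiseWitness_cartesianProdFlat) ∧ cartesianProdFlat_alt (pvRaiseWitness_cartesianProdFlat) = pvRaiseWitnessOut_cartesianProdFlat)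

-- ===== LEMMAS AND PROOFS =====

-- the common mathematical value: right-fold cartesian product
def pvProdR (l : List (List Int)) : List (List Int) :=
  l.foldr (fun lst acc => lst.flatMap (fun x => acc.map (fun t => x :: t))) [[]]

theorem pv_foldl_push {α β : Type} (f : α → β) :
    ∀ (l : List α) (init : List β),
      l.foldl (fun acc el => acc ++ [f el]) init = init ++ l.map f := by
  intro l
  induction l with
  | nil => simp
  | cons a l ih => intro init; simp [List.foldl, ih]

theorem pv_foldl_nested (arr2 : List (List Int)) :
    ∀ (arr1 : List Int) (init : List (List Int)),
      arr1.foldl (fun acc el1 => arr2.foldl (fun acc2 el2 => acc2 ++ [el1 :: el2]) acc) init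
        = init ++ arr1.flatMap (fun el1 => arr2.map (fun el2 => el1 :: el2)) := by
  intro arr1
  induction arr1 with
  | nil => simp
  | cons a arr1 ih =>
      intro init
      simp only [List.foldl, ih, pv_foldl_push (fun el2 => a :: el2) arr2]
      simp [List.flatMap, List.append_assoc]

theorem pv_A_eq_prodR : ∀ (a : List Int) (l : List (List Int)),
    cartesianProdFlat (a :: l) = pvProdR (a :: l) := by
  intro a l
  induction l generalizing a with
  | nil =>
      simp only [cartesianProdFlat, pvProdR, List.foldr, pv_foldl_push (fun el => [el]) a,
        List.nil_append]
      simp only [List.flatMap]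
      induction a with
      | nil => rfl
      | cons x a ih => simp [ih]
  | cons b l ih =>
      simp only [cartesianProdFlat, pv_foldl_nested, List.nil_append, ih b]
      rfl

theorem pv_B_eq_prodR : ∀ (l : List (List Int)) (init : List (List Int)),
    l.foldl (fun result lst => result.flatMap (fun r => lst.map (fun x => r ++ [x]))) init
      = init.flatMap (fun r => (pvProdR l).map (fun t => r ++ t)) := by
  intro l
  induction l with
  | nil => simp [pvProdR]
  | cons lst l ih =>
      intro init
      simp only [List.foldl, ih]
      simp [pvProdR, List.flatMap_assoc, List.map_map, List.flatMap_map,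
        List.map_flatMap, List.append_assoc, Function.comp_def]

-- ===== VERDICT (by name: the statement is the Claim_ definition above) =====
theorem cartesianProdFlat_spec : Claim_equal_cartesianProdFlat := by
  intro listVars _ hpre
  unfold Spec_cartesianProdFlat cartesianProdFlat_alt
  cases listVars with
  | nil => exact absurd rfl hpre
  | cons a l =>
      rw [pv_A_eq_prodR, pv_B_eq_prodR]
      simp

@[simp] theorem cartesianProdFlat_raises : Claim_raises_cartesianProdFlat := by
  unfold Claim_raises_cartesianProdFlat
  exact ⟨fun l _ hr hp => hp hr, by decide⟩
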